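-- pv_equiv track=rewrite | github.com/onlypatric/tshell | executor.py | MakeCommandReadable
-- ===== SOURCE A (Python) =====
-- def MakeCommandReadable(s):
--     # Initialize an empty list to store the split strings
--     split_strings = []
--     # Initialize an empty string to build up the current split string
--     current_split_string = ''
--     # Initialize a flag to track whether the current character is inside double quotes
--     in_quotes = False
--
--     # Iterate through each character in the string
--     for i, c in enumerate(s):
--         # If we encounter a double quote character, toggle the in_quotes flag
--         if c == '"':
--             current_split_string += c
--             in_quotes = not in_quotes
--         # If we encounter a semicolon and we're not in quotes, split the string
--         elif c == ';' and not in_quotes: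
--             split_strings.append(current_split_string)
--             current_split_string = ''
--         # Otherwise, add the character to the current split string
--         else:
--             current_split_string += c
--
--     # Add the final split string to the list
--     split_strings.append(current_split_string)
--
--     return split_strings
-- ===== SOURCE B (Python) =====
-- def MakeCommandReadable(s):
--     pieces = s.split('"')
--     out = []
--     cur = ''
--     for i, p in enumerate(pieces):
--         if i > 0:
--             cur += '"'
--         if i % 2 == 0:
--             parts = p.split(';')
--             cur += parts[0]
--             for part in parts[1:]:
--                 out.append(cur)
--                 cur = part
--         else:
--             cur += p
--     out.append(cur)
--     return out
-- ===== Notes on version B (the rewrite author's own statement) =====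
-- stated objective: faster
-- what changed: Instead of a character-by-character Python loop with an in_quotes flag and per-character string concatenation, B splits the string on the quote character into alternating outside/inside-quote regions and only splits the outside (even-index) regions on the semicolon, doing the bulk of the work in C-level str.split.
import Mathlib
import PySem

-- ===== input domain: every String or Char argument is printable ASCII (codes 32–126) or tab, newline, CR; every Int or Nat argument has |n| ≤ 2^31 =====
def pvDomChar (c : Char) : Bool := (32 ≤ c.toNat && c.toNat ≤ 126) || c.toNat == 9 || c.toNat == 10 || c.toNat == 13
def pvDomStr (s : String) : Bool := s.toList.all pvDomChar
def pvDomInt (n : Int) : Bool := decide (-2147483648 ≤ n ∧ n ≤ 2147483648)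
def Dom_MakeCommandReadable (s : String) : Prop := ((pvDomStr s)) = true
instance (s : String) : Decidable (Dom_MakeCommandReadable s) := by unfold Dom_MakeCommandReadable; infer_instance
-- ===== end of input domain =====

-- B replaces A's per-character scan with an in_quotes flag by splitting on the quote character
-- and splitting only the outside-quote (even-index) regions on the semicolon (objective: faster
-- in Python, measured, via bulk str.split instead of per-character concatenation).

-- ===== PORT A =====
-- A's loop body: state = (split_strings, current_split_string, in_quotes)
def aStep (st : List (List Char) × List Char × Bool) (c : Char) :
    List (List Char) × List Char × Bool :=
  if c = '"' then (st.1, st.2.1 ++ [c], !st.2.2)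
  else if c = ';' ∧ st.2.2 = false then (st.1 ++ [st.2.1], [], st.2.2)
  else (st.1, st.2.1 ++ [c], st.2.2)

def MakeCommandReadable (s : String) : List String :=
  let r := s.toList.foldl aStep ([], [], false)
  (r.1 ++ [r.2.1]).map String.ofList

-- ===== PORT B =====
-- B's loop body over enumerate(pieces): state = (out, cur)
def bStep (st : List (List Char) × List Char) (ip : Int × List Char) :
    List (List Char) × List Char :=
  let cur := if ip.1 > 0 then st.2 ++ ['"'] else st.2
  if PySem.Int.mod ip.1 2 = 0 then
    match PySem.Chars.splitOn ip.2 [';'] with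
    | [] => (st.1, cur)
    | h :: t => t.foldl (fun st' part => (st'.1 ++ [st'.2], part)) (st.1, cur ++ h)
  else (st.1, cur ++ ip.2)

def MakeCommandReadable_alt (s : String) : List String :=
  let pieces := PySem.Chars.splitOn s.toList ['"']
  let r := (PySem.List.enumerate pieces).foldl bStep ([], [])
  (r.1 ++ [r.2]).map String.ofList

-- ===== PRECONDITION & SPEC =====
def Spec_MakeCommandReadable (s : String) (out : List String) : Prop := out = MakeCommandReadable_alt s
instance (s : String) (out : List String) : Decidable (Spec_MakeCommandReadable s out) := by unfold Spec_MakeCommandReadable; infer_instance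

-- ===== CLAIM (what is proved, stated in full; the proofs are below) =====
def Claim_equal_MakeCommandReadable : Prop := ∀ (s : String), Dom_MakeCommandReadable s → Spec_MakeCommandReadable s (MakeCommandReadable s)

-- ===== LEMMAS AND PROOFS =====

-- prepend to the head piece of a split result
def consHead (p : List Char) : List (List Char) → List (List Char)
  | [] => [p]
  | h :: t => (p ++ h) :: t

-- structural single-character split (what Chars.splitOn computes for a one-char separator)
def splitOnChar (c : Char) : List Char → List (List Char)
  | [] => [[]]
  | x :: xs => if x = c then [] :: splitOnChar c xs else consHead [x] (splitOnChar c xs)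

theorem splitOnChar_ne_nil (c : Char) (l : List Char) : splitOnChar c l ≠ [] := by
  cases l with
  | nil => simp [splitOnChar]
  | cons x xs =>
    simp only [splitOnChar]
    split_ifs
    · simp
    · cases h : splitOnChar c xs <;> simp [consHead]

theorem go_eq (c : Char) (l : List Char) : ∀ (f : Nat) (cur : List Char)
    (acc : List (List Char)), l.length < f →
    PySem.Chars.splitOn.go [c] f l cur acc
      = acc.reverse ++ consHead cur.reverse (splitOnChar c l) := by
  induction l with
  | nil =>
    intro f cur acc hf
    match f, hf with
    | f + 1, _ => simp [PySem.Chars.splitOn.go, splitOnChar, consHead]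
  | cons x xs ih =>
    intro f cur acc hf
    match f, hf with
    | f + 1, hf =>
      rw [PySem.Chars.splitOn.go]
      by_cases hx : x = c
      · subst hx
        have hpre : List.isPrefixOf [x] (x :: xs) = true := by
          simp [List.isPrefixOf]
        rw [if_pos hpre]
        have hd : List.drop ([x].length) (x :: xs) = xs := by simp
        rw [hd, ih f [] (cur.reverse :: acc) (by have := hf; simp at this; omega)]
        have h2 := splitOnChar_ne_nil x xs
        cases h : splitOnChar x xs with
        | nil => exact absurd h h2
        | cons p ps => simp [splitOnChar, consHead, h]
      · have hpre : List.isPrefixOf [c] (x :: xs) = false := by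
          simp [List.isPrefixOf]
          exact fun h => absurd h.symm hx
        rw [hpre]
        simp only [Bool.false_eq_true, if_false]
        rw [ih f (x :: cur) acc (by have := hf; simp at this; omega)]
        have h2 := splitOnChar_ne_nil c xs
        cases h : splitOnChar c xs with
        | nil => exact absurd h h2
        | cons p ps => simp [splitOnChar, consHead, h, hx]

theorem splitOn_eq (c : Char) (l : List Char) :
    PySem.Chars.splitOn l [c] = splitOnChar c l := by
  unfold PySem.Chars.splitOn
  rw [go_eq c l (l.length + 1) [] [] (by omega)]
  have h2 := splitOnChar_ne_nil c l
  cases h : splitOnChar c l with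
  | nil => exact absurd h h2
  | cons p ps => simp [consHead]

-- direct scan splitting on ';' (semantics of an even piece)
def F (st : List (List Char) × List Char) : List Char → List (List Char) × List Char
  | [] => st
  | x :: xs => if x = ';' then F (st.1 ++ [st.2], []) xs else F (st.1, st.2 ++ [x]) xs

theorem F_eq_fold (p : List Char) : ∀ (st : List (List Char) × List Char),
    (match splitOnChar ';' p with
      | [] => st
      | h :: t => t.foldl (fun st' part => (st'.1 ++ [st'.2], part)) (st.1, st.2 ++ h))
      = F st p := by
  induction p with
  | nil => intro st; simp [splitOnChar, F]
  | cons x xs ih =>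
    intro st
    by_cases hx : x = ';'
    · simp only [splitOnChar, hx, if_pos]
      have h2 := splitOnChar_ne_nil ';' xs
      cases h : splitOnChar ';' xs with
      | nil => exact absurd h h2
      | cons h' t' =>
        have := ih (st.1 ++ [st.2], ([] : List Char))
        rw [h] at this
        simpa [F, hx] using this
    · simp only [splitOnChar, hx, if_false]
      have h2 := splitOnChar_ne_nil ';' xs
      cases h : splitOnChar ';' xs with
      | nil => exact absurd h h2
      | cons h' t' =>
        have := ih (st.1, st.2 ++ [x])
        rw [h] at this
        simpa [F, hx, consHead, List.append_assoc] using this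

-- processing of one piece: inside quotes appended verbatim, outside split on ';'
def procPiece (inq : Bool) (st : List (List Char) × List Char) (p : List Char) :
    List (List Char) × List Char :=
  if inq then (st.1, st.2 ++ p) else F st p

-- processing of all pieces after the first: each is preceded by the removed '"'
def Htail (inq : Bool) (st : List (List Char) × List Char) :
    List (List Char) → List (List Char) × List Char
  | [] => st
  | p :: ps => Htail (!inq) (procPiece inq (st.1, st.2 ++ ['"']) p) ps

def K (inq : Bool) (st : List (List Char) × List Char) :
    List (List Char) → List (List Char) × List Char
  | [] => st
  | p :: ps => Htail (!inq) (procPiece inq st p) ps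

def proj (st : List (List Char) × List Char × Bool) : List (List Char) × List Char :=
  (st.1, st.2.1)

theorem A_scan_eq (l : List Char) : ∀ (inq : Bool) (acc : List (List Char)) (cur : List Char),
    proj (l.foldl aStep (acc, cur, inq)) = K inq (acc, cur) (splitOnChar '"' l) := by
  induction l with
  | nil => intro inq acc cur; cases inq <;> simp [splitOnChar, K, procPiece, Htail, F, proj]
  | cons x xs ih =>
    intro inq acc cur
    by_cases hx : x = '"'
    · have h2 := splitOnChar_ne_nil '"' xs
      cases h : splitOnChar '"' xs with
      | nil => exact absurd h h2
      | cons p ps =>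
        have step : aStep (acc, cur, inq) x = (acc, cur ++ ['"'], !inq) := by
          simp [aStep, hx]
        rw [List.foldl_cons, step, ih (!inq) acc (cur ++ ['"'])]
        rw [h]
        simp only [splitOnChar, hx, if_pos, h, K, Htail, Bool.not_not]
        cases inq <;> simp [procPiece, F]
    · have h2 := splitOnChar_ne_nil '"' xs
      cases h : splitOnChar '"' xs with
      | nil => exact absurd h h2
      | cons p ps =>
        rw [List.foldl_cons]
        simp only [splitOnChar, hx, if_false, h, consHead, K]
        cases inq with
        | true =>
          have step : aStep (acc, cur, true) x = (acc, cur ++ [x], true) := by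
            simp [aStep, hx]
          rw [step, ih true acc (cur ++ [x]), h]
          simp [K, procPiece, List.append_assoc]
        | false =>
          by_cases hsemi : x = ';'
          · have step : aStep (acc, cur, false) x = (acc ++ [cur], [], false) := by
              simp [aStep, hsemi]
            rw [step, ih false (acc ++ [cur]) [], h]
            simp [K, procPiece, F, hsemi]
          · have step : aStep (acc, cur, false) x = (acc, cur ++ [x], false) := by
              simp [aStep, hx, hsemi]
            rw [step, ih false acc (cur ++ [x]), h]
            simp [K, procPiece, F, hsemi]

theorem bStep_pos (st : List (List Char) × List Char) (k : Nat) (p : List Char) :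
    bStep st (((k : Int) + 1), p)
      = procPiece (decide ((k + 1) % 2 = 1)) (st.1, st.2 ++ ['"']) p := by
  have hpos : ((k : Int) + 1) > 0 := by positivity
  have hmod : PySem.Int.mod ((k : Int) + 1) 2 = (((k + 1) % 2 : Nat) : Int) := by
    have h := PySem.Int.mod_natCast (k + 1) 2
    push_cast at h ⊢
    exact h
  simp only [bStep, hpos, if_pos, hmod]
  by_cases hpar : (k + 1) % 2 = 0
  · simp only [hpar, Nat.cast_zero, if_pos, procPiece]
    rw [splitOn_eq]
    exact F_eq_fold p (st.1, st.2 ++ ['"'])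
  · have h1 : (k + 1) % 2 = 1 := by omega
    have h0 : ¬ (((k + 1) % 2 : Nat) : Int) = 0 := by omega
    simp [h1, procPiece]

theorem B_scan_eq (ps : List (List Char)) : ∀ (k : Nat) (st : List (List Char) × List Char),
    (PySem.List.enumerate ps ((k : Int) + 1)).foldl bStep st
      = Htail (decide ((k + 1) % 2 = 1)) st ps := by
  induction ps with
  | nil => intro k st; simp [PySem.List.enumerate_nil, Htail]
  | cons p ps ih =>
    intro k st
    rw [PySem.List.enumerate_cons, List.foldl_cons, bStep_pos]
    have : ((k : Int) + 1 + 1) = ((k + 1 : Nat) : Int) + 1 := by push_cast; ring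
    rw [this, ih (k + 1)]
    have hb : (!decide ((k + 1) % 2 = 1)) = decide ((k + 1 + 1) % 2 = 1) := by
      by_cases h : (k + 1) % 2 = 1
      · have : (k + 1 + 1) % 2 = 0 := by omega
        simp [h, this]
      · have : (k + 1 + 1) % 2 = 1 := by omega
        simp [h, this]
    simp [Htail, hb]

-- ===== VERDICT (by name: the statement is the Claim_ definition above) =====
theorem MakeCommandReadable_spec : Claim_equal_MakeCommandReadable := by
  intro s _
  unfold Spec_MakeCommandReadable MakeCommandReadable MakeCommandReadable_alt
  rw [splitOn_eq]
  have hA := A_scan_eq s.toList false [] []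
  have h2 := splitOnChar_ne_nil '"' s.toList
  cases h : splitOnChar '"' s.toList with
  | nil => exact absurd h h2
  | cons p ps =>
    rw [h] at hA
    have hfirst : bStep ([], []) ((0 : Int), p) = procPiece false ([], []) p := by
      simp only [bStep, procPiece]
      norm_num
      rw [splitOn_eq]
      exact F_eq_fold p ([], [])
    have hB : (PySem.List.enumerate (p :: ps)).foldl bStep ([], [])
        = K false ([], []) (p :: ps) := by
      rw [PySem.List.enumerate_cons, List.foldl_cons, hfirst]
      have h01 : (0 : Int) + 1 = ((0 : Nat) : Int) + 1 := by norm_num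
      rw [h01, B_scan_eq ps 0 (procPiece false ([], []) p)]
      simp [K]
    simp only [hB]
    have := hA
    simp only [proj] at this
    rw [← this]
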